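-- pv_equiv track=rewrite | github.com/vishavjitsingh07/Python-Problems | June/June 02.py | solve
-- ===== SOURCE A (Python) =====
-- def solve(N, K, GeekNum):
--     s = sum(GeekNum)
--     currLen = K
--     for i in range(N-K):
--         GeekNum.append(s)
--         currLen+=1
--         s = s + GeekNum[-1] - GeekNum[currLen-K-1]
--     return GeekNum[N-1]
-- ===== SOURCE B (Python) =====
-- def solve(N, K, GeekNum):
--     for i in range(N - K):
--         GeekNum.append(sum(GeekNum[i:]))
--     return GeekNum[N - 1]
-- ===== Notes on version B (the rewrite author's own statement) =====
-- stated objective: simpler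
-- what changed: B drops A's running-sum and running-length bookkeeping entirely and recomputes each appended term directly as sum(GeekNum[i:]), the sum of the current suffix starting at the loop index, which provably equals A's incrementally maintained s.
import Mathlib
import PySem

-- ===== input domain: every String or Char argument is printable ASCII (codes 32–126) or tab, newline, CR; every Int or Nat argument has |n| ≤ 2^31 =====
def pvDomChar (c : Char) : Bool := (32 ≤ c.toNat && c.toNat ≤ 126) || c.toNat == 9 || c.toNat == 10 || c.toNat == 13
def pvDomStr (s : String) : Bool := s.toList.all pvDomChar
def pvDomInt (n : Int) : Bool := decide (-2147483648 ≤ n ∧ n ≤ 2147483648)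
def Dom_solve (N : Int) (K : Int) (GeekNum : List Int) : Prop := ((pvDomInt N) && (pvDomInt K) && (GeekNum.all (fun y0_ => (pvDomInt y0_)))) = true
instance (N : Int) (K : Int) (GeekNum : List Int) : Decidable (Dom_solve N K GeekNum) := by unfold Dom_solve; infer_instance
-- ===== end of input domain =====

-- B drops A's running-sum/running-length bookkeeping and recomputes each appended term
-- directly as sum(GeekNum[i:]); objective: simpler.  Both A and B append the same elements
-- to GeekNum in place (identical mutation).

-- ===== PORT A =====
-- one loop iteration of A: append s, bump currLen, update s incrementally
-- (the let-bound g = st.1 ++ [st.2.2] and currLen = st.2.1 + 1 are written inline)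
def stepA (K : Int) (st : List Int × Int × Int) : List Int × Int × Int :=
  (st.1 ++ [st.2.2], st.2.1 + 1,
   st.2.2 + PySem.List.pyGetD (st.1 ++ [st.2.2]) (-1) 0
     - PySem.List.pyGetD (st.1 ++ [st.2.2]) (st.2.1 + 1 - K - 1) 0)

def solve (N : Int) (K : Int) (GeekNum : List Int) : Int :=
  let st := (PySem.List.pyRange 0 (N - K) 1).foldl (fun st _ => stepA K st)
              (GeekNum, K, GeekNum.sum)
  PySem.List.pyGetD st.1 (N - 1) 0   -- exact under Pre_ (N-1 is then a valid index)

-- ===== PORT B =====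
-- one loop iteration of B: append sum(GeekNum[i:])
def stepB (g : List Int) (i : Int) : List Int :=
  g ++ [(PySem.List.slice g (some i) none).sum]

def solve_alt (N : Int) (K : Int) (GeekNum : List Int) : Int :=
  let g := (PySem.List.pyRange 0 (N - K) 1).foldl (fun g i => stepB g i) GeekNum
  PySem.List.pyGetD g (N - 1) 0   -- exact under Pre_ (N-1 is then a valid index)

-- ===== PRECONDITION & SPEC =====
-- Pre_ is exactly where the Python A returns: the loop itself never raises (its index
-- currLen-K-1 equals the loop counter i, always in range), so A raises iff the final
-- GeekNum[N-1] is out of range for the final list of length len(GeekNum) + max(0, N-K).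
def Pre_solve (N : Int) (K : Int) (GeekNum : List Int) : Prop :=
  -((GeekNum.length : Int) + max (N - K) 0) ≤ N - 1 ∧
    N - 1 < (GeekNum.length : Int) + max (N - K) 0
instance (N : Int) (K : Int) (GeekNum : List Int) : Decidable (Pre_solve N K GeekNum) := by
  unfold Pre_solve; infer_instance

def pvWitness_solve : Int × Int × List Int := (7, 3, [1, 2, 3])

def Spec_solve (N : Int) (K : Int) (GeekNum : List Int) (out : Int) : Prop := out = solve_alt N K GeekNum
instance (N : Int) (K : Int) (GeekNum : List Int) (out : Int) : Decidable (Spec_solve N K GeekNum out) := by unfold Spec_solve; infer_instance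

-- ===== CLAIM (what is proved, stated in full; the proofs are below) =====
def Claim_equal_solve : Prop := ∀ (N : Int) (K : Int) (GeekNum : List Int), Dom_solve N K GeekNum → Pre_solve N K GeekNum → Spec_solve N K GeekNum (solve N K GeekNum)

-- ===== LEMMAS AND PROOFS =====

lemma stepB_eq (g : List Int) (i : Int) (h0 : 0 ≤ i) :
    stepB g i = g ++ [(g.drop i.toNat).sum] := by
  unfold stepB
  rw [PySem.List.slice_from _ h0]

-- A's incremental update of s equals B's direct suffix sum, one step
lemma stepA_eq (K : Int) (g : List Int) (i : Int) (h0 : 0 ≤ i) (hlen : i.toNat ≤ g.length) :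
    stepA K (g, K + i, (g.drop i.toNat).sum)
      = (stepB g i, K + (i + 1), ((stepB g i).drop (i + 1).toNat).sum) := by
  have hB : stepB g i = g ++ [(g.drop i.toNat).sum] := stepB_eq g i h0
  have hidx : K + i + 1 - K - 1 = ((i.toNat : Nat) : Int) := by omega
  have hi1 : (i + 1).toNat = i.toNat + 1 := by omega
  unfold stepA
  rw [hB, Prod.mk.injEq, Prod.mk.injEq]
  refine ⟨rfl, by ring, ?_⟩
  rw [PySem.List.pyGetD_neg_one_append_singleton, hidx, PySem.List.pyGetD_natCast, hi1]
  by_cases hi : i.toNat < g.length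
  · have hget : (g ++ [(g.drop i.toNat).sum]).getD i.toNat 0 = g[i.toNat] := by
      rw [List.getD_append _ _ _ _ hi]
      exact List.getD_eq_getElem _ _ hi
    have hdrop : (g ++ [(g.drop i.toNat).sum]).drop (i.toNat + 1)
        = g.drop (i.toNat + 1) ++ [(g.drop i.toNat).sum] := by
      rw [List.drop_append_of_le_length (by omega)]
    have hsplit : (g.drop i.toNat).sum = g[i.toNat] + (g.drop (i.toNat + 1)).sum := by
      rw [List.drop_eq_getElem_cons hi, List.sum_cons]
    rw [hget, hdrop, List.sum_append, List.sum_cons]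
    simp only [List.sum_nil, add_zero]
    omega
  · have heq : i.toNat = g.length := by omega
    have hS0 : (g.drop i.toNat).sum = 0 := by rw [heq, List.drop_length]; rfl
    have hget : (g ++ [(g.drop i.toNat).sum]).getD i.toNat 0 = (g.drop i.toNat).sum := by
      rw [List.getD_eq_getElem _ _ (by simp [heq])]
      simp [heq]
    have hdrop : ((g ++ [(g.drop i.toNat).sum]).drop (i.toNat + 1)).sum = 0 := by
      rw [List.drop_eq_nil_of_le (by simp [heq])]; rfl
    rw [hget, hdrop, hS0]
    ring

-- loop invariant: A's fold state is (B's list, K + next index, suffix sum from next index)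
lemma loop_inv (K M : Int) :
    ∀ (n : Nat) (i : Int) (g : List Int), (M - i).toNat = n → 0 ≤ i → i.toNat ≤ g.length →
    ((PySem.List.pyRange i M 1).foldl (fun st _ => stepA K st)
        (g, K + i, (g.drop i.toNat).sum)).1
      = (PySem.List.pyRange i M 1).foldl (fun g i => stepB g i) g := by
  intro n
  induction n with
  | zero =>
    intro i g hn _ _
    rw [PySem.List.pyRange_one_eq_nil (by omega)]
    rfl
  | succ n ih =>
    intro i g hn h0 hlen
    rw [PySem.List.pyRange_one_cons (by omega), List.foldl_cons, List.foldl_cons,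
        stepA_eq K g i h0 hlen]
    exact ih (i + 1) (stepB g i) (by omega) (by omega)
      (by rw [stepB_eq g i h0]; simp; omega)

theorem solve_spec_aux (N : Int) (K : Int) (GeekNum : List Int) :
    solve N K GeekNum = solve_alt N K GeekNum := by
  simp only [solve, solve_alt]
  have hinit : (GeekNum, K, GeekNum.sum)
      = (GeekNum, K + 0, (GeekNum.drop (0 : Int).toNat).sum) := by norm_num
  rw [hinit, loop_inv K (N - K) (N - K - 0).toNat 0 GeekNum rfl (by omega) (by simp)]

-- ===== VERDICT (by name: the statement is the Claim_ definition above) =====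
theorem solve_spec : Claim_equal_solve := by
  intro N K GeekNum _ _
  exact solve_spec_aux N K GeekNum
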